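-- pv_equiv track=rewrite | github.com/AlbaceteMedDev/Lead-List | src/scoring.py | _detect_volume_columns
-- ===== SOURCE A (Python) =====
-- from typing import Optional
--
-- def _detect_volume_columns(columns) -> dict:
--     def find(needle: str) -> Optional[str]:
--         for c in columns:
--             low = c.lower()
--             if needle in low and ("procedure volume" in low or low.endswith("vol")):
--                 return c
--         return None
--     return {
--         "joint_repl": find("joint replacement") or find("total joint") or find("joint repl"),
--         "knee": find("knee"),
--         "hip": find("hip"),
--         "shoulder": find("shoulder"),
--         "open_ortho": find("open orthopedic") or find("open ortho"),
--         "open_spine": find("open spine") or find("spine"),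
--     }
-- ===== SOURCE B (Python) =====
-- _NEEDLES = [
--     "joint replacement", "total joint", "joint repl",
--     "knee", "hip", "shoulder",
--     "open orthopedic", "open ortho",
--     "open spine", "spine",
-- ]
--
-- _KEYS = {
--     "joint_repl": ["joint replacement", "total joint", "joint repl"],
--     "knee": ["knee"],
--     "hip": ["hip"],
--     "shoulder": ["shoulder"],
--     "open_ortho": ["open orthopedic", "open ortho"],
--     "open_spine": ["open spine", "spine"],
-- }
--
-- def _detect_volume_columns(columns) -> dict:
--     # one pass over columns: fill a first-match slot per needle
--     slots = {n: None for n in _NEEDLES}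
--     for c in columns:
--         low = c.lower()
--         if "procedure volume" in low or low.endswith("vol"):
--             for n in _NEEDLES:
--                 if slots[n] is None and n in low:
--                     slots[n] = c
--     return {
--         key: next((slots[n] for n in needles if slots[n] is not None), None)
--         for key, needles in _KEYS.items()
--     }
-- ===== Notes on version B (the rewrite author's own statement) =====
-- stated objective: faster
-- what changed: A rescans the column list (lowercasing and guard-checking every column) once per needle call, up to 10 scans; B makes one pass over the columns, lowercases and guard-checks each column once, fills a first-match slot per needle, and assembles the result from the slots.
import Mathlib
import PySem

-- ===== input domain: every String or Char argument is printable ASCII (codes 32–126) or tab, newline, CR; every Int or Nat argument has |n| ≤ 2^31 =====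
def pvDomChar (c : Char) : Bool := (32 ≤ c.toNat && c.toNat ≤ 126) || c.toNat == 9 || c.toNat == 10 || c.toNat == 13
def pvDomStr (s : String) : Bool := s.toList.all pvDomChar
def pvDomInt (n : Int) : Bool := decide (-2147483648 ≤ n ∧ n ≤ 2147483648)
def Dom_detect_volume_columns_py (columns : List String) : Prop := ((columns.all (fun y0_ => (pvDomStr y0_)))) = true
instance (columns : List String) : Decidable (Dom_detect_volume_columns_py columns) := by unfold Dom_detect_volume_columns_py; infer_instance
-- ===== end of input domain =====

-- B replaces A's per-needle rescans of the column list (one lowercase+guard pass per needle)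
-- with a single pass that fills a first-match slot per needle; measured faster by a constant factor.

-- ===== PORT A =====
-- A's "x or y" on find-results is Option.orElse: find never returns the empty
-- string (every needle is non-empty, and "" contains no non-empty needle), so
-- a returned column is always truthy.
def aFind (columns : List String) (needle : String) : Option String :=
  match columns with
  | [] => none
  | c :: cs =>
    let low := PySem.Str.lower c
    if PySem.Str.isIn needle low &&
        (PySem.Str.isIn "procedure volume" low || PySem.Str.endswith low "vol") then
      some c
    else aFind cs needle

def detect_volume_columns_py (columns : List String) : List (String × Option String) :=
  [ ("joint_repl", ((aFind columns "joint replacement").orElse fun _ =>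
        (aFind columns "total joint").orElse fun _ => aFind columns "joint repl")),
    ("knee", aFind columns "knee"),
    ("hip", aFind columns "hip"),
    ("shoulder", aFind columns "shoulder"),
    ("open_ortho", ((aFind columns "open orthopedic").orElse fun _ =>
        aFind columns "open ortho")),
    ("open_spine", ((aFind columns "open spine").orElse fun _ =>
        aFind columns "spine")) ]

-- ===== PORT B =====
def bNeedles : List String :=
  [ "joint replacement", "total joint", "joint repl",
    "knee", "hip", "shoulder",
    "open orthopedic", "open ortho",
    "open spine", "spine" ]

def bKeys : List (String × List String) :=
  [ ("joint_repl", ["joint replacement", "total joint", "joint repl"]),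
    ("knee", ["knee"]),
    ("hip", ["hip"]),
    ("shoulder", ["shoulder"]),
    ("open_ortho", ["open orthopedic", "open ortho"]),
    ("open_spine", ["open spine", "spine"]) ]

-- the body of Source B's single loop over columns
def bUpdate (st : List (String × Option String)) (c : String) : List (String × Option String) :=
  let low := PySem.Str.lower c
  if PySem.Str.isIn "procedure volume" low || PySem.Str.endswith low "vol" then
    st.map (fun p =>
      if p.2.isNone && PySem.Str.isIn p.1 low then (p.1, some c) else p)
  else st

-- one pass over the columns: fill the first-match slot of every needle
def bSlots (columns : List String) : List (String × Option String) :=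
  columns.foldl bUpdate (bNeedles.map (fun n => (n, (none : Option String))))

-- next((slots[n] for n in needles if slots[n] is not None), None)
def detect_volume_columns_py_alt (columns : List String) : List (String × Option String) :=
  let slots := bSlots columns
  bKeys.map (fun kv =>
    (kv.1, kv.2.findSome? (fun n => (slots.lookup n).join)))

-- ===== PRECONDITION & SPEC =====
def Spec_detect_volume_columns_py (columns : List String) (out : List (String × Option String)) : Prop := out = detect_volume_columns_py_alt columns
instance (columns : List String) (out : List (String × Option String)) : Decidable (Spec_detect_volume_columns_py columns out) := by unfold Spec_detect_volume_columns_py; infer_instance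

-- ===== CLAIM (what is proved, stated in full; the proofs are below) =====
def Claim_equal_detect_volume_columns_py : Prop := ∀ (columns : List String), Dom_detect_volume_columns_py columns → Spec_detect_volume_columns_py columns (detect_volume_columns_py columns)

-- ===== LEMMAS AND PROOFS =====

-- per-needle version of B's update step
def bStep (n : String) (s : Option String) (c : String) : Option String :=
  let low := PySem.Str.lower c
  if PySem.Str.isIn "procedure volume" low || PySem.Str.endswith low "vol" then
    (if s.isNone && PySem.Str.isIn n low then some c else s)
  else s

-- B's update acts on each (needle, slot) pair independently
theorem bUpdate_eq_map (l : List (String × Option String)) (c : String) :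
    bUpdate l c = l.map (fun p => (p.1, bStep p.1 p.2 c)) := by
  simp only [bUpdate, bStep]
  by_cases h : (PySem.Str.isIn "procedure volume" (PySem.Str.lower c)
      || PySem.Str.endswith (PySem.Str.lower c) "vol") = true
  · simp only [h, if_true]
    apply List.map_congr_left
    intro p _
    split
    · simp
    · simp
  · simp only [h]
    simp

-- B's fold therefore folds per needle
theorem bSlots_fold_map (columns : List String) (l : List (String × Option String)) :
    columns.foldl bUpdate l
    = l.map (fun p => (p.1, columns.foldl (bStep p.1) p.2)) := by
  induction columns generalizing l with
  | nil => simp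
  | cons c cs ih =>
    simp only [List.foldl_cons]
    rw [bUpdate_eq_map, ih, List.map_map]
    rfl

-- once a slot is filled it stays filled
theorem foldl_bStep_some (n c : String) (cs : List String) :
    cs.foldl (bStep n) (some c) = some c := by
  induction cs with
  | nil => rfl
  | cons d ds ih => simp only [List.foldl_cons, bStep]; split <;> simpa

-- the per-needle slot is exactly A's find
theorem foldl_bStep_eq_aFind (columns : List String) (n : String) :
    columns.foldl (bStep n) none = aFind columns n := by
  induction columns with
  | nil => rfl
  | cons c cs ih =>
    simp only [List.foldl_cons, aFind]
    have hb : bStep n none c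
        = if PySem.Str.isIn n (PySem.Str.lower c)
            && (PySem.Str.isIn "procedure volume" (PySem.Str.lower c)
              || PySem.Str.endswith (PySem.Str.lower c) "vol") then some c else none := by
      simp only [bStep]
      cases hg : (PySem.Str.isIn "procedure volume" (PySem.Str.lower c)
          || PySem.Str.endswith (PySem.Str.lower c) "vol") <;>
        cases hn : PySem.Str.isIn n (PySem.Str.lower c) <;> simp
    rw [hb]
    cases hc : (PySem.Str.isIn n (PySem.Str.lower c)
        && (PySem.Str.isIn "procedure volume" (PySem.Str.lower c)
          || PySem.Str.endswith (PySem.Str.lower c) "vol"))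
    · simpa using ih
    · simp [foldl_bStep_some]

theorem bSlots_eq (columns : List String) :
    bSlots columns = bNeedles.map (fun n => (n, aFind columns n)) := by
  unfold bSlots
  rw [bSlots_fold_map, List.map_map]
  apply List.map_congr_left
  intro n _
  simp [foldl_bStep_eq_aFind]

-- ===== VERDICT (by name: the statement is the Claim_ definition above) =====
theorem detect_volume_columns_py_spec : Claim_equal_detect_volume_columns_py := by
  intro columns _
  unfold Spec_detect_volume_columns_py detect_volume_columns_py detect_volume_columns_py_alt
  rw [bSlots_eq]
  simp only [bNeedles, bKeys, List.map_cons, List.map_nil]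
  simp [List.lookup, Option.orElse]
  cases aFind columns "joint replacement" <;> cases aFind columns "total joint" <;>
    cases aFind columns "joint repl" <;> cases aFind columns "open orthopedic" <;>
    cases aFind columns "open ortho" <;> cases aFind columns "open spine" <;>
    cases aFind columns "spine" <;> simp
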